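-- pv_equiv track=rewrite | github.com/Petkomat/psa2 | leto2223_koda/vaje07/drevesa.py | find_full_tree_size
-- ===== SOURCE A (Python) =====
-- from typing import List, Tuple
--
-- def find_full_tree_size(n: int) -> Tuple[int, int]:
--     depth = 1
--     n_leaves = 1
--     while n_leaves < n:
--         n_leaves <<= 1
--         depth += 1
--     full_size = (1 << depth) - 1
--     offset = full_size - (1 << depth - 1)
--     return full_size, offset
-- ===== SOURCE B (Python) =====
-- def find_full_tree_size(n):
--     # closed form: depth of the smallest full binary tree with >= n leaves
--     depth = max(n - 1, 0).bit_length() + 1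
--     full_size = (1 << depth) - 1
--     offset = full_size - (1 << (depth - 1))
--     return full_size, offset
-- ===== Notes on version B (the rewrite author's own statement) =====
-- stated objective: simpler
-- what changed: The doubling while-loop that searches for the first power of two >= n is replaced by a closed-form depth computed with bit_length (clamped at 0 for n <= 1), then the same two shift expressions.
import Mathlib
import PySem

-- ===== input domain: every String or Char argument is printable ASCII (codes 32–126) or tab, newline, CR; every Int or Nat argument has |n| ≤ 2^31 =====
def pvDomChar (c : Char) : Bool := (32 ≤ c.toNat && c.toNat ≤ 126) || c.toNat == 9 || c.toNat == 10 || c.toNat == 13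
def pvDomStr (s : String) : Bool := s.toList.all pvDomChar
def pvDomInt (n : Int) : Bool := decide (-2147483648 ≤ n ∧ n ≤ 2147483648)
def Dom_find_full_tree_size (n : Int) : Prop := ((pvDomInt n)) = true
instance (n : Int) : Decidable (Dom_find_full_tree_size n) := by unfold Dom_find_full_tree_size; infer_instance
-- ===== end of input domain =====

-- B replaces A's doubling while-loop by a closed-form depth from bit_length; objective: simpler.

-- ===== PORT A =====
-- needed by the port's termination/recursion argument (n_leaves <<= 1)
theorem pv_shl_one (a : Int) : a <<< (1 : Nat) = a * 2 := by
  rw [Int.shiftLeft_eq]; norm_num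

-- the 'while n_leaves < n' loop; h records the loop invariant 1 ≤ n_leaves (true from the start),
-- used only for termination
def findLoopA (n leaves depth : Int) (h : 1 ≤ leaves) : Int :=
  if _hlt : leaves < n then
    findLoopA n (leaves <<< (1 : Nat)) (depth + 1) (by rw [pv_shl_one]; omega)
  else depth
termination_by (n - leaves).toNat
decreasing_by rw [pv_shl_one]; omega

def find_full_tree_size (n : Int) : Int × Int :=
  let depth := findLoopA n 1 1 (by norm_num)
  -- Python's '1 << depth' / '1 << depth - 1': exact, since depth ≥ 1 on every run
  let full_size := (1 : Int) <<< depth.toNat - 1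
  (full_size, full_size - (1 : Int) <<< (depth - 1).toNat)

-- ===== PORT B =====
def find_full_tree_size_alt (n : Int) : Int × Int :=
  let depth : Nat := PySem.Int.bitLength (max (n - 1) 0) + 1
  let full_size : Int := (1 : Int) <<< depth - 1
  (full_size, full_size - (1 : Int) <<< (depth - 1))

-- ===== PRECONDITION & SPEC =====
def Spec_find_full_tree_size (n : Int) (out : Int × Int) : Prop := out = find_full_tree_size_alt n
instance (n : Int) (out : Int × Int) : Decidable (Spec_find_full_tree_size n out) := by unfold Spec_find_full_tree_size; infer_instance

-- ===== CLAIM (what is proved, stated in full; the proofs are below) =====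
def Claim_equal_find_full_tree_size : Prop := ∀ (n : Int), Dom_find_full_tree_size n → Spec_find_full_tree_size n (find_full_tree_size n)

-- ===== LEMMAS AND PROOFS =====

-- the loop started at leaves = 2^k, depth = k+1 stops at depth = max k (bit_length (max (n-1) 0)) + 1
theorem findLoopA_eq (n : Int) (k : Nat) (h : 1 ≤ (2:Int)^k) :
    findLoopA n ((2:Int)^k) ((k : Int) + 1) h
      = ((max k (PySem.Int.bitLength (max (n - 1) 0)) : Nat) : Int) + 1 := by
  have h1 : (1:Int) ≤ 2^k := one_le_pow₀ (by norm_num)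
  by_cases hlt : (2:Int)^k < n
  · -- loop body runs: m := n-1 satisfies 2^k ≤ m, so k < bitLength m
    have hm : max (n - 1) 0 = n - 1 := by omega
    have hk : k < PySem.Int.bitLength (max (n - 1) 0) := by
      rw [hm]
      by_contra hle
      have hlt2 := PySem.Int.lt_two_pow_bitLength (n - 1)
      have hpow : (2:Nat) ^ PySem.Int.bitLength (n - 1) ≤ 2 ^ k :=
        Nat.pow_le_pow_right (by norm_num) (by omega)
      have hna : ((n - 1).natAbs : Int) = n - 1 := Int.natAbs_of_nonneg (by omega)
      have h2k : ((2:Nat) ^ k : Int) = (2:Int)^k := by push_cast; ring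
      omega
    rw [findLoopA]
    simp only [hlt, dif_pos]
    have hshape : (2:Int)^k <<< (1:Nat) = (2:Int)^(k+1) := by rw [pv_shl_one]; ring
    simp only [hshape]
    have hd : ((k:Int) + 1 + 1) = ((k + 1 : Nat) : Int) + 1 := by push_cast; ring
    rw [hd, findLoopA_eq n (k + 1) (one_le_pow₀ (by norm_num))]
    have : max (k + 1) (PySem.Int.bitLength (max (n - 1) 0))
         = max k (PySem.Int.bitLength (max (n - 1) 0)) := by omega
    rw [this]
  · -- loop stops: n ≤ 2^k, so bitLength (max (n-1) 0) ≤ k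
    have hk : PySem.Int.bitLength (max (n - 1) 0) ≤ k := by
      by_contra hgt
      set m := max (n - 1) 0 with hm
      have hm0 : m ≠ 0 := by
        intro h0
        rw [h0] at hgt
        simp [PySem.Int.bitLength_zero] at hgt
      have hlow : 2 ^ (PySem.Int.bitLength m - 1) ≤ m.natAbs :=
        PySem.Int.two_pow_bitLength_le m hm0
      have hpow : (2:Nat) ^ k ≤ 2 ^ (PySem.Int.bitLength m - 1) :=
        Nat.pow_le_pow_right (by norm_num) (by omega)
      have hmn : (m.natAbs : Int) = m := Int.natAbs_of_nonneg (by omega)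
      have h2k : ((2:Nat) ^ k : Int) = (2:Int)^k := by push_cast; ring
      omega
    rw [findLoopA]
    simp only [hlt, dif_neg, not_false_iff]
    have : max k (PySem.Int.bitLength (max (n - 1) 0)) = k := by omega
    rw [this]
termination_by (n - (2:Int)^k).toNat
decreasing_by
  have : (2:Int)^(k+1) = 2^k * 2 := by ring
  have : (1:Int) ≤ 2^k := one_le_pow₀ (by norm_num)
  omega

-- ===== VERDICT (by name: the statement is the Claim_ definition above) =====
theorem find_full_tree_size_spec : Claim_equal_find_full_tree_size := by
  intro n _
  show find_full_tree_size n = find_full_tree_size_alt n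
  unfold find_full_tree_size find_full_tree_size_alt
  have h0 : findLoopA n 1 1 (by norm_num)
      = ((max 0 (PySem.Int.bitLength (max (n - 1) 0)) : Nat) : Int) + 1 := by
    have := findLoopA_eq n 0 (by norm_num)
    simpa using this
  rw [h0]
  simp only [Nat.zero_max]
  set B := PySem.Int.bitLength (max (n - 1) 0)
  have h1 : (((B : Int) + 1)).toNat = B + 1 := by omega
  have h2 : (((B : Int) + 1) - 1).toNat = B := by omega
  rw [h1, h2]
  simp
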